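-- pv_equiv track=rewrite | github.com/wonderways/html_plus_plus | compiler.py | getSpecialChar
-- ===== SOURCE A (Python) =====
-- specialChars = "+-.,;:][{}()&%$#!|<>=/~^"
--
-- def getSpecialChar(data,pos):
--     word = ""
--     state = 0;
--     for i in range(pos ,len(data)):
--         c = data[i]
--         if state == 0:
--             if c in specialChars:
--                 state = 1
--                 word += c
--         elif state == 1:
--             if not(c in specialChars):
--                return word , i
--             else:
--                 word += c
--     return word , None
-- ===== SOURCE B (Python) =====
-- specialChars = "+-.,;:][{}()&%$#!|<>=/~^"
--
-- def getSpecialChar(data, pos):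
--     special = frozenset(specialChars)
--     n = len(data)
--     i = max(pos, 0)
--     while i < n and data[i] not in special:
--         i += 1
--     start = i
--     while i < n and data[i] in special:
--         i += 1
--     word = data[start:i]
--     return (word, i) if i < n else (word, None)
-- ===== Notes on version B (the rewrite author's own statement) =====
-- stated objective: simpler
-- what changed: Replaced A's char-by-char two-state accumulator loop with two forward index scans (find start of the special run, find its end) and one slice, clamping the start position to 0.
-- intended difference: For -len(data) <= pos < 0 with a special char in data[len(data)+pos:], A's negative indexing wraps around and scans that suffix before the whole string (e.g. returning a negative break index or a doubled run), while B clamps pos to 0 and returns the first special run of the string itself, the intended reading of scanning from position pos. — e.g. on getSpecialChar("+a", -2): A returns ("+", some (-1)), B returns ("+", some 1)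
import Mathlib
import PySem

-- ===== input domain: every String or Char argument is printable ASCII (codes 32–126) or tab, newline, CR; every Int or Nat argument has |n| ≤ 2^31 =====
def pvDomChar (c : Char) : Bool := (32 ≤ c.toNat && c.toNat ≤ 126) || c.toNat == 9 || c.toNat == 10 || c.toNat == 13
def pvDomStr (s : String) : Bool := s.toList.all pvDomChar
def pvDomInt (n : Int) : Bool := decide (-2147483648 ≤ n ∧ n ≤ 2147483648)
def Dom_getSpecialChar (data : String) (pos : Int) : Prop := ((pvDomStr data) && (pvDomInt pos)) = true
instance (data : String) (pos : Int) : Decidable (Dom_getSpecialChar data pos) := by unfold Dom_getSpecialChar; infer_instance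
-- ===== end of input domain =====

-- B replaces A's char-by-char two-state machine with two forward index scans (run start, run end) plus
-- one slice — simpler; B clamps a negative pos to 0 instead of A's accidental negative-index wraparound.

-- ===== PORT A =====
def pvSpecial : List Char := "+-.,;:][{}()&%$#!|<>=/~^".toList

-- literal port of A's for-loop with early return; pyGet? = none is Python's IndexError (excluded by Pre_)
def pvGoA (data : List Char) (idxs : List Int) (word : List Char) (state : Int) :
    List Char × Option Int :=
  match idxs with
  | [] => (word, none)
  | i :: rest =>
    match PySem.List.pyGet? data i with
    | none => (word, none)   -- IndexError: unreachable under Pre_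
    | some c =>
      if state = 0 then
        if c ∈ pvSpecial then pvGoA data rest (word ++ [c]) 1
        else pvGoA data rest word state
      else
        if c ∉ pvSpecial then (word, some i)
        else pvGoA data rest (word ++ [c]) state

def getSpecialChar (data : String) (pos : Int) : String × Option Int :=
  let r := pvGoA data.toList (PySem.List.pyRange pos (data.toList.length : Int) 1) [] 0
  (String.ofList r.1, r.2)

-- ===== PORT B =====
-- while i < n and p data[i]: i += 1  — returns the index where the loop stops (fuel n - i makes it structural)
def pvScanAux (data : List Char) (p : Char → Bool) : Nat → Nat → Nat
  | 0, i => i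
  | fuel + 1, i =>
    if h : i < data.length then
      (if p data[i] then pvScanAux data p fuel (i + 1) else i)
    else i

def pvScan (data : List Char) (p : Char → Bool) (i : Nat) : Nat :=
  pvScanAux data p (data.length - i) i

def getSpecialChar_alt (data : String) (pos : Int) : String × Option Int :=
  let cs := data.toList
  let i0 := (max pos 0).toNat
  let start := pvScan cs (fun c => !decide (c ∈ pvSpecial)) i0
  let stop := pvScan cs (fun c => decide (c ∈ pvSpecial)) start
  let word := PySem.List.slice cs (some (start : Int)) (some (stop : Int))
  (String.ofList word, if (stop : Int) < (cs.length : Int) then some (stop : Int) else none)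

-- ===== PRECONDITION & SPEC =====
-- Pre_ excludes exactly the inputs on which A raises IndexError: pos < -len(data).
def Pre_getSpecialChar (data : String) (pos : Int) : Prop :=
  -(data.toList.length : Int) ≤ pos
instance (data : String) (pos : Int) : Decidable (Pre_getSpecialChar data pos) := by
  unfold Pre_getSpecialChar; infer_instance

def pvWitness_getSpecialChar : String × Int := ("ab+c", 0)

-- On -len(data) ≤ pos < 0 with a special char in data[len(data)+pos:], A's negative indexing wraps
-- around and scans that suffix before the whole string (returning e.g. a negative break index),
-- while B clamps pos to 0 and returns the first special run of data itself — the intended reading of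
-- scanning "from position pos".
def D_getSpecialChar (data : String) (pos : Int) : Prop :=
  pos < 0 ∧
    (PySem.List.slice data.toList (some ((data.toList.length : Int) + pos)) none).any
      (fun c => decide (c ∈ pvSpecial)) = true
instance (data : String) (pos : Int) : Decidable (D_getSpecialChar data pos) := by
  unfold D_getSpecialChar; infer_instance

def Spec_getSpecialChar (data : String) (pos : Int) (out : String × Option Int) : Prop :=
  ¬ D_getSpecialChar data pos → out = getSpecialChar_alt data pos
instance (data : String) (pos : Int) (out : String × Option Int) :
    Decidable (Spec_getSpecialChar data pos out) := by
  unfold Spec_getSpecialChar; infer_instance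

def pvDiffWitness_getSpecialChar : String × Int := ("+a", -2)
def pvDiffWitnessOut_getSpecialChar : (String × Option Int) × (String × Option Int) :=
  (("+", some (-1)), ("+", some 1))

-- ===== CLAIM (what is proved, stated in full; the proofs are below) =====
def Claim_unchanged_getSpecialChar : Prop := ∀ (data : String) (pos : Int),
  Dom_getSpecialChar data pos → Pre_getSpecialChar data pos →
    Spec_getSpecialChar data pos (getSpecialChar data pos)
def Claim_changed_getSpecialChar : Prop :=
  Dom_getSpecialChar (pvDiffWitness_getSpecialChar.1) (pvDiffWitness_getSpecialChar.2) ∧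
  Pre_getSpecialChar (pvDiffWitness_getSpecialChar.1) (pvDiffWitness_getSpecialChar.2) ∧
  D_getSpecialChar (pvDiffWitness_getSpecialChar.1) (pvDiffWitness_getSpecialChar.2) ∧
  getSpecialChar (pvDiffWitness_getSpecialChar.1) (pvDiffWitness_getSpecialChar.2) = pvDiffWitnessOut_getSpecialChar.1 ∧
  getSpecialChar_alt (pvDiffWitness_getSpecialChar.1) (pvDiffWitness_getSpecialChar.2) = pvDiffWitnessOut_getSpecialChar.2 ∧
  pvDiffWitnessOut_getSpecialChar.1 ≠ pvDiffWitnessOut_getSpecialChar.2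

def Claim_exact_getSpecialChar : Prop := ∀ (data : String) (pos : Int),
  Dom_getSpecialChar data pos → Pre_getSpecialChar data pos → D_getSpecialChar data pos →
    getSpecialChar data pos ≠ getSpecialChar_alt data pos

-- ===== LEMMAS AND PROOFS =====

theorem pvScanAux_fuel (data : List Char) (p : Char → Bool) :
    ∀ f i, data.length - i ≤ f → pvScanAux data p f i = pvScan data p i := by
  intro f
  induction f with
  | zero => intro i h; unfold pvScan; congr 1; omega
  | succ f ih =>
    intro i h
    unfold pvScan
    by_cases hi : i < data.length
    · have h2 : data.length - i = (data.length - (i+1)) + 1 := by omega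
      rw [h2]
      simp only [pvScanAux, hi, dif_pos]
      by_cases hp : p data[i]
      · simp only [hp, if_pos]
        rw [ih (i+1) (by omega)]
        rfl
      · simp [hp]
    · have h2 : data.length - i = 0 := by omega
      rw [h2]
      simp [pvScanAux, hi]

-- the loop-step characterisation of pvScan (independent of the fuel)
theorem pvScan_eq (data : List Char) (p : Char → Bool) (i : Nat) :
    pvScan data p i =
      if h : i < data.length then (if p data[i] then pvScan data p (i + 1) else i) else i := by
  by_cases hi : i < data.length
  · rw [pvScan]
    have h2 : data.length - i = (data.length - (i+1)) + 1 := by omega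
    rw [h2]
    simp only [pvScanAux, hi, dif_pos]
    by_cases hp : p data[i]
    · simp only [hp, if_pos]
      exact pvScanAux_fuel data p _ _ (by omega)
    · simp [hp]
  · rw [pvScan]
    have h2 : data.length - i = 0 := by omega
    rw [h2]
    simp [pvScanAux, hi]

theorem pvScan_ge (data : List Char) (p : Char → Bool) (i : Nat) : i ≤ pvScan data p i := by
  rw [pvScan]
  generalize h : data.length - i = f
  clear h
  induction f generalizing i with
  | zero => simp [pvScanAux]
  | succ f ih =>
    simp only [pvScanAux]
    split
    · split
      · exact le_trans (by omega) (ih (i+1))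
      · omega
    · omega

-- A's state-1 phase (accumulating the run) = B's second scan
theorem pvGoA_one (cs : List Char) :
    ∀ (f j : Nat) (w : List Char), cs.length - j ≤ f →
    pvGoA cs (PySem.List.pyRange (j : Int) (cs.length : Int) 1) w 1 =
      (w ++ (cs.drop j).take (pvScan cs (fun c => decide (c ∈ pvSpecial)) j - j),
       if (pvScan cs (fun c => decide (c ∈ pvSpecial)) j : Int) < (cs.length : Int)
       then some (pvScan cs (fun c => decide (c ∈ pvSpecial)) j : Int) else none) := by
  intro f
  induction f with
  | zero =>
    intro j w h
    have hj : cs.length ≤ j := by omega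
    rw [PySem.List.pyRange_one_eq_nil (by exact_mod_cast hj)]
    rw [pvScan_eq]
    have hnj : ¬ (j < cs.length) := by omega
    simp [pvGoA, hnj]
  | succ f ih =>
    intro j w h
    by_cases hj : j < cs.length
    · rw [PySem.List.pyRange_one_cons (by exact_mod_cast hj)]
      have hcast : (j : Int) + 1 = ((j + 1 : Nat) : Int) := by push_cast; ring
      rw [hcast]
      rw [pvScan_eq]
      simp only [hj, dif_pos]
      by_cases hp : cs[j] ∈ pvSpecial
      · have hstep : pvGoA cs (((j:Nat) : Int) :: PySem.List.pyRange ((j+1:Nat):Int) (cs.length:Int) 1) w 1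
            = pvGoA cs (PySem.List.pyRange ((j+1:Nat):Int) (cs.length:Int) 1) (w ++ [cs[j]]) 1 := by
          simp [pvGoA, PySem.List.pyGet?_natCast, List.getElem?_eq_getElem hj, hp]
        rw [hstep, ih (j+1) (w ++ [cs[j]]) (by omega)]
        have hge : j + 1 ≤ pvScan cs (fun c => decide (c ∈ pvSpecial)) (j+1) := pvScan_ge _ _ _
        simp only [hp, decide_true, if_pos, Prod.mk.injEq]
        refine ⟨?_, trivial⟩
        rw [List.append_assoc]
        congr 1
        rw [List.drop_eq_getElem_cons hj,
            show pvScan cs (fun c => decide (c ∈ pvSpecial)) (j+1) - j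
              = (pvScan cs (fun c => decide (c ∈ pvSpecial)) (j+1) - (j+1)) + 1 from by omega,
            List.take_succ_cons, List.singleton_append]
      · have hstop : pvGoA cs (((j:Nat) : Int) :: PySem.List.pyRange ((j+1:Nat):Int) (cs.length:Int) 1) w 1
            = (w, some (j : Int)) := by
          simp [pvGoA, PySem.List.pyGet?_natCast, List.getElem?_eq_getElem hj, hp]
        rw [hstop]
        simp only [hp, decide_false, Bool.false_eq_true, if_false, Prod.mk.injEq]
        constructor
        · simp
        · rw [if_pos (by exact_mod_cast hj)]
    · rw [PySem.List.pyRange_one_eq_nil (by exact_mod_cast (by omega : cs.length ≤ j))]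
      rw [pvScan_eq]
      simp only [hj, dif_neg, not_false_iff]
      simp [pvGoA]
      omega

-- A's whole loop from a non-negative index = B's two scans from that index
theorem pvGoA_zero (cs : List Char) :
    ∀ (f j : Nat), cs.length - j ≤ f →
    pvGoA cs (PySem.List.pyRange (j : Int) (cs.length : Int) 1) [] 0 =
      ((cs.drop (pvScan cs (fun c => !decide (c ∈ pvSpecial)) j)).take
         (pvScan cs (fun c => decide (c ∈ pvSpecial)) (pvScan cs (fun c => !decide (c ∈ pvSpecial)) j)
           - pvScan cs (fun c => !decide (c ∈ pvSpecial)) j),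
       if (pvScan cs (fun c => decide (c ∈ pvSpecial)) (pvScan cs (fun c => !decide (c ∈ pvSpecial)) j) : Int)
            < (cs.length : Int)
       then some (pvScan cs (fun c => decide (c ∈ pvSpecial)) (pvScan cs (fun c => !decide (c ∈ pvSpecial)) j) : Int)
       else none) := by
  intro f
  induction f with
  | zero =>
    intro j h
    have hj : cs.length ≤ j := by omega
    have hnj : ¬ (j < cs.length) := by omega
    rw [PySem.List.pyRange_one_eq_nil (by exact_mod_cast hj)]
    rw [pvScan_eq cs (fun c => !decide (c ∈ pvSpecial)) j]
    simp only [hnj, dif_neg, not_false_iff]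
    rw [pvScan_eq cs (fun c => decide (c ∈ pvSpecial)) j]
    simp only [hnj, dif_neg, not_false_iff]
    simp [pvGoA]
    omega
  | succ f ih =>
    intro j h
    by_cases hj : j < cs.length
    · rw [PySem.List.pyRange_one_cons (by exact_mod_cast hj)]
      have hcast : (j : Int) + 1 = ((j + 1 : Nat) : Int) := by push_cast; ring
      rw [hcast]
      rw [pvScan_eq cs (fun c => !decide (c ∈ pvSpecial)) j]
      simp only [hj, dif_pos]
      by_cases hp : cs[j] ∈ pvSpecial
      · -- the run starts here: A enters state 1 with word [cs[j]]
        have hstep : pvGoA cs (((j:Nat) : Int) :: PySem.List.pyRange ((j+1:Nat):Int) (cs.length:Int) 1) [] 0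
            = pvGoA cs (PySem.List.pyRange ((j+1:Nat):Int) (cs.length:Int) 1) [cs[j]] 1 := by
          simp [pvGoA, PySem.List.pyGet?_natCast, List.getElem?_eq_getElem hj, hp]
        rw [hstep, pvGoA_one cs (cs.length - (j+1)) (j+1) [cs[j]] (by omega)]
        simp only [hp, decide_true, Bool.not_true, Bool.false_eq_true, if_false]
        rw [pvScan_eq cs (fun c => decide (c ∈ pvSpecial)) j]
        simp only [hj, dif_pos, hp, decide_true, if_pos]
        have hge : j + 1 ≤ pvScan cs (fun c => decide (c ∈ pvSpecial)) (j+1) := pvScan_ge _ _ _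
        refine Prod.ext ?_ rfl
        simp only
        rw [List.drop_eq_getElem_cons hj,
            show pvScan cs (fun c => decide (c ∈ pvSpecial)) (j+1) - j
              = (pvScan cs (fun c => decide (c ∈ pvSpecial)) (j+1) - (j+1)) + 1 from by omega,
            List.take_succ_cons, List.singleton_append]
      · have hstep : pvGoA cs (((j:Nat) : Int) :: PySem.List.pyRange ((j+1:Nat):Int) (cs.length:Int) 1) [] 0
            = pvGoA cs (PySem.List.pyRange ((j+1:Nat):Int) (cs.length:Int) 1) [] 0 := by
          simp [pvGoA, PySem.List.pyGet?_natCast, List.getElem?_eq_getElem hj, hp]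
        rw [hstep, ih (j+1) (by omega)]
        simp only [hp, decide_false, Bool.not_false, if_pos]
    · rw [PySem.List.pyRange_one_eq_nil (by exact_mod_cast (by omega : cs.length ≤ j))]
      have hnj : ¬ (j < cs.length) := hj
      rw [pvScan_eq cs (fun c => !decide (c ∈ pvSpecial)) j]
      simp only [hnj, dif_neg, not_false_iff]
      rw [pvScan_eq cs (fun c => decide (c ∈ pvSpecial)) j]
      simp only [hnj, dif_neg, not_false_iff]
      simp [pvGoA]
      omega

-- indices whose characters are all non-special are a no-op for A's state-0 loop
theorem pvGoA_skip (cs : List Char) (l2 : List Int) :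
    ∀ l1 : List Int,
      (∀ i ∈ l1, ∃ c, PySem.List.pyGet? cs i = some c ∧ c ∉ pvSpecial) →
      pvGoA cs (l1 ++ l2) [] 0 = pvGoA cs l2 [] 0 := by
  intro l1
  induction l1 with
  | nil => intro _; rfl
  | cons i l1 ih =>
    intro h
    obtain ⟨c, hc, hnc⟩ := h i (by simp)
    have := ih (fun i hi => h i (by simp [hi]))
    simp [pvGoA, hc, hnc, this]

theorem pvScan_le_of_not (cs : List Char) (p : Char → Bool) :
    ∀ (f j m : Nat), m - j ≤ f → j ≤ m → (hm : m < cs.length) → p cs[m] = false →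
      pvScan cs p j ≤ m := by
  intro f
  induction f with
  | zero =>
    intro j m h hjm hm hp
    have : j = m := by omega
    subst this
    rw [pvScan_eq]
    simp [hm, hp]
  | succ f ih =>
    intro j m h hjm hm hp
    rcases Nat.eq_or_lt_of_le hjm with heq | hlt
    · subst heq
      rw [pvScan_eq]
      simp [hm, hp]
    · rw [pvScan_eq]
      have hj : j < cs.length := by omega
      simp only [hj, dif_pos]
      by_cases hq : p cs[j]
      · simp only [hq, if_pos]
        exact ih (j+1) m (by omega) (by omega) hm hp
      · simp [hq]
        omega

theorem pvScan_stop (cs : List Char) (p : Char → Bool) :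
    ∀ (f j m : Nat), cs.length - j ≤ f → pvScan cs p j = m → (hm : m < cs.length) →
      p cs[m] = false := by
  intro f
  induction f with
  | zero =>
    intro j m hf hpv hm
    rw [pvScan_eq] at hpv
    have hnj : ¬ j < cs.length := by omega
    simp [hnj] at hpv
    omega
  | succ f ih =>
    intro j m hf hpv hm
    rw [pvScan_eq] at hpv
    by_cases hj : j < cs.length
    · simp only [hj, dif_pos] at hpv
      by_cases hq : p cs[j]
      · simp only [hq, if_pos] at hpv
        exact ih (j+1) m (by omega) hpv hm
      · simp only [hq, Bool.false_eq_true, if_false] at hpv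
        subst hpv
        simpa using hq
    · simp [hj] at hpv
      omega

-- A's state-1 phase over the wrapped (negative) indices
theorem pvGoA_one_neg (cs : List Char) :
    ∀ (f j : Nat) (w : List Char), cs.length - j ≤ f →
    pvGoA cs (PySem.List.pyRange ((j : Int) - (cs.length : Int)) 0 1
              ++ PySem.List.pyRange 0 (cs.length : Int) 1) w 1 =
      (if pvScan cs (fun c => decide (c ∈ pvSpecial)) j < cs.length then
        (w ++ (cs.drop j).take (pvScan cs (fun c => decide (c ∈ pvSpecial)) j - j),
         some ((pvScan cs (fun c => decide (c ∈ pvSpecial)) j : Int) - (cs.length : Int)))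
       else pvGoA cs (PySem.List.pyRange 0 (cs.length : Int) 1) (w ++ cs.drop j) 1) := by
  intro f
  induction f with
  | zero =>
    intro j w h
    have hj : cs.length ≤ j := by omega
    rw [PySem.List.pyRange_one_eq_nil (a := (j : Int) - (cs.length : Int)) (b := 0) (by omega)]
    rw [pvScan_eq]
    have hnj : ¬ (j < cs.length) := by omega
    simp only [hnj, dif_neg, not_false_iff]
    rw [if_neg not_false, List.drop_eq_nil_of_le hj, List.append_nil, List.nil_append]
  | succ f ih =>
    intro j w h
    by_cases hj : j < cs.length
    · rw [PySem.List.pyRange_one_cons (a := (j : Int) - (cs.length : Int)) (by omega)]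
      have hget : PySem.List.pyGet? cs ((j : Int) - (cs.length : Int)) = some cs[j] := by
        have hk : ((cs.length - j : Nat) : Int) = (cs.length : Int) - (j : Int) := by omega
        have h1 : (j : Int) - (cs.length : Int) = -((cs.length - j : Nat) : Int) := by omega
        rw [h1, PySem.List.pyGet?_neg_natCast cs (cs.length - j) (by omega) (by omega)]
        have h2 : cs.length - (cs.length - j) = j := by omega
        rw [List.getElem?_eq_getElem (by omega)]
        simp [h2]
      rw [pvScan_eq]
      simp only [hj, dif_pos]
      by_cases hp : cs[j] ∈ pvSpecial
      · have hstep : pvGoA cs (((j : Int) - (cs.length : Int)) ::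
              (PySem.List.pyRange ((j : Int) - (cs.length : Int) + 1) 0 1
               ++ PySem.List.pyRange 0 (cs.length : Int) 1)) w 1
            = pvGoA cs (PySem.List.pyRange (((j+1 : Nat) : Int) - (cs.length : Int)) 0 1
               ++ PySem.List.pyRange 0 (cs.length : Int) 1) (w ++ [cs[j]]) 1 := by
          have hc : (j : Int) - (cs.length : Int) + 1 = ((j+1 : Nat) : Int) - (cs.length : Int) := by
            push_cast; ring
          simp [pvGoA, hget, hp, hc]
        rw [List.cons_append, hstep, ih (j+1) (w ++ [cs[j]]) (by omega)]
        simp only [hp, decide_true, if_pos]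
        have hge : j + 1 ≤ pvScan cs (fun c => decide (c ∈ pvSpecial)) (j+1) := pvScan_ge _ _ _
        by_cases he : pvScan cs (fun c => decide (c ∈ pvSpecial)) (j+1) < cs.length
        · rw [if_pos he, if_pos he]
          refine Prod.ext ?_ rfl
          simp only
          rw [List.append_assoc]
          congr 1
          rw [List.drop_eq_getElem_cons hj,
              show pvScan cs (fun c => decide (c ∈ pvSpecial)) (j+1) - j
                = (pvScan cs (fun c => decide (c ∈ pvSpecial)) (j+1) - (j+1)) + 1 from by omega,
              List.take_succ_cons, List.singleton_append]
        · rw [if_neg he, if_neg he]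
          congr 1
          rw [List.append_assoc]
          congr 1
          rw [List.drop_eq_getElem_cons hj, List.singleton_append]
      · have hstop : pvGoA cs (((j : Int) - (cs.length : Int)) ::
              (PySem.List.pyRange ((j : Int) - (cs.length : Int) + 1) 0 1
               ++ PySem.List.pyRange 0 (cs.length : Int) 1)) w 1
            = (w, some ((j : Int) - (cs.length : Int))) := by
          simp [pvGoA, hget, hp]
        rw [List.cons_append, hstop]
        simp only [hp, decide_false, Bool.false_eq_true, if_false]
        rw [if_pos hj]
        simp
    · rw [PySem.List.pyRange_one_eq_nil (a := (j : Int) - (cs.length : Int)) (b := 0) (by omega)]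
      rw [pvScan_eq]
      simp only [hj, dif_neg, not_false_iff]
      rw [if_neg not_false, List.drop_eq_nil_of_le (by omega), List.append_nil, List.nil_append]

-- A's whole loop started inside the wrapped (negative) indices
theorem pvGoA_zero_neg (cs : List Char) :
    ∀ (f j : Nat), cs.length - j ≤ f →
    pvGoA cs (PySem.List.pyRange ((j : Int) - (cs.length : Int)) 0 1
              ++ PySem.List.pyRange 0 (cs.length : Int) 1) [] 0 =
      (if pvScan cs (fun c => !decide (c ∈ pvSpecial)) j < cs.length then
        (if pvScan cs (fun c => decide (c ∈ pvSpecial))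
              (pvScan cs (fun c => !decide (c ∈ pvSpecial)) j) < cs.length then
          ((cs.drop (pvScan cs (fun c => !decide (c ∈ pvSpecial)) j)).take
             (pvScan cs (fun c => decide (c ∈ pvSpecial))
                (pvScan cs (fun c => !decide (c ∈ pvSpecial)) j)
              - pvScan cs (fun c => !decide (c ∈ pvSpecial)) j),
           some ((pvScan cs (fun c => decide (c ∈ pvSpecial))
                    (pvScan cs (fun c => !decide (c ∈ pvSpecial)) j) : Int) - (cs.length : Int)))
         else pvGoA cs (PySem.List.pyRange 0 (cs.length : Int) 1)
                (cs.drop (pvScan cs (fun c => !decide (c ∈ pvSpecial)) j)) 1)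
       else pvGoA cs (PySem.List.pyRange 0 (cs.length : Int) 1) [] 0) := by
  intro f
  induction f with
  | zero =>
    intro j h
    have hj : cs.length ≤ j := by omega
    have hnj : ¬ (j < cs.length) := by omega
    rw [PySem.List.pyRange_one_eq_nil (a := (j : Int) - (cs.length : Int)) (b := 0) (by omega)]
    rw [pvScan_eq cs (fun c => !decide (c ∈ pvSpecial)) j]
    simp only [hnj, dif_neg, not_false_iff]
    rw [if_neg not_false, List.nil_append]
  | succ f ih =>
    intro j h
    by_cases hj : j < cs.length
    · rw [PySem.List.pyRange_one_cons (a := (j : Int) - (cs.length : Int)) (by omega)]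
      have hget : PySem.List.pyGet? cs ((j : Int) - (cs.length : Int)) = some cs[j] := by
        have h1 : (j : Int) - (cs.length : Int) = -((cs.length - j : Nat) : Int) := by omega
        rw [h1, PySem.List.pyGet?_neg_natCast cs (cs.length - j) (by omega) (by omega)]
        have h2 : cs.length - (cs.length - j) = j := by omega
        rw [List.getElem?_eq_getElem (by omega)]
        simp [h2]
      rw [pvScan_eq cs (fun c => !decide (c ∈ pvSpecial)) j]
      simp only [hj, dif_pos]
      by_cases hp : cs[j] ∈ pvSpecial
      · -- run starts inside the wrapped part
        have hc : (j : Int) - (cs.length : Int) + 1 = ((j+1 : Nat) : Int) - (cs.length : Int) := by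
          push_cast; ring
        have hstep : pvGoA cs (((j : Int) - (cs.length : Int)) ::
              (PySem.List.pyRange (((j+1 : Nat) : Int) - (cs.length : Int)) 0 1
               ++ PySem.List.pyRange 0 (cs.length : Int) 1)) [] 0
            = pvGoA cs (PySem.List.pyRange (((j+1 : Nat) : Int) - (cs.length : Int)) 0 1
               ++ PySem.List.pyRange 0 (cs.length : Int) 1) [cs[j]] 1 := by
          simp [pvGoA, hget, hp]
        rw [List.cons_append, hc, hstep, pvGoA_one_neg cs (cs.length - (j+1)) (j+1) [cs[j]] (by omega)]
        simp only [hp, decide_true, Bool.not_true, Bool.false_eq_true, if_false, if_pos hj]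
        rw [pvScan_eq cs (fun c => decide (c ∈ pvSpecial)) j]
        simp only [hj, dif_pos, hp, decide_true, if_pos]
        have hge : j + 1 ≤ pvScan cs (fun c => decide (c ∈ pvSpecial)) (j+1) := pvScan_ge _ _ _
        by_cases he : pvScan cs (fun c => decide (c ∈ pvSpecial)) (j+1) < cs.length
        · rw [if_pos he, if_pos he]
          refine Prod.ext ?_ rfl
          simp only
          rw [List.drop_eq_getElem_cons hj,
              show pvScan cs (fun c => decide (c ∈ pvSpecial)) (j+1) - j
                = (pvScan cs (fun c => decide (c ∈ pvSpecial)) (j+1) - (j+1)) + 1 from by omega,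
              List.take_succ_cons, List.singleton_append]
        · rw [if_neg he, if_neg he]
          congr 1
          rw [List.drop_eq_getElem_cons hj, List.singleton_append]
      · have hstep : pvGoA cs (((j : Int) - (cs.length : Int)) ::
              (PySem.List.pyRange (((j+1 : Nat) : Int) - (cs.length : Int)) 0 1
               ++ PySem.List.pyRange 0 (cs.length : Int) 1)) [] 0
            = pvGoA cs (PySem.List.pyRange (((j+1 : Nat) : Int) - (cs.length : Int)) 0 1
               ++ PySem.List.pyRange 0 (cs.length : Int) 1) [] 0 := by
          simp [pvGoA, hget, hp]
        have hc : (j : Int) - (cs.length : Int) + 1 = ((j+1 : Nat) : Int) - (cs.length : Int) := by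
          push_cast; ring
        rw [List.cons_append, hc, hstep, ih (j+1) (by omega)]
        simp only [hp, decide_false, Bool.not_false, if_pos]
    · rw [PySem.List.pyRange_one_eq_nil (a := (j : Int) - (cs.length : Int)) (b := 0) (by omega)]
      rw [pvScan_eq cs (fun c => !decide (c ∈ pvSpecial)) j]
      simp only [hj, dif_neg, not_false_iff]
      rw [if_neg not_false, List.nil_append]

-- ===== VERDICT (by name: the statement is the Claim_ definition above) =====
theorem getSpecialChar_spec : Claim_unchanged_getSpecialChar := by
  intro data pos _ hpre hnd
  unfold Pre_getSpecialChar at hpre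
  simp only [getSpecialChar, getSpecialChar_alt]
  set cs := data.toList with hcs
  by_cases hpos : 0 ≤ pos
  · have hmax : (max pos 0).toNat = pos.toNat := by omega
    have hpn : pos = ((pos.toNat : Nat) : Int) := (Int.toNat_of_nonneg hpos).symm
    rw [hmax, hpn, pvGoA_zero cs cs.length pos.toNat (by omega)]
    rw [PySem.List.slice_natCast]
    rfl
  · -- pos < 0 and (¬ D_) : the wrapped prefix of A's loop sees no special char, so it is a no-op
    have hmax : (max pos 0).toNat = 0 := by omega
    have hsplit : PySem.List.pyRange pos (cs.length : Int) 1
        = PySem.List.pyRange pos 0 1 ++ PySem.List.pyRange 0 (cs.length : Int) 1 :=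
      PySem.List.pyRange_one_append pos 0 (cs.length : Int) (by omega) (by omega)
    have hnosp : ∀ c ∈ cs.drop ((cs.length : Int) + pos).toNat, c ∉ pvSpecial := by
      unfold D_getSpecialChar at hnd
      simp only [← hcs] at hnd
      rw [PySem.List.slice_from cs (by omega)] at hnd
      intro c hc hmem
      exact hnd ⟨by omega, by simp [List.any_eq_true]; exact ⟨c, hc, hmem⟩⟩
    have hskip : pvGoA cs (PySem.List.pyRange pos (cs.length : Int) 1) [] 0
        = pvGoA cs (PySem.List.pyRange 0 (cs.length : Int) 1) [] 0 := by
      rw [hsplit]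
      apply pvGoA_skip
      intro i hi
      rw [PySem.List.mem_pyRange_one] at hi
      obtain ⟨k, hik, hk1, hk2⟩ : ∃ k : Nat, i = -(k : Int) ∧ 0 < k ∧ k ≤ cs.length :=
        ⟨(-i).toNat, by omega, by omega, by omega⟩
      subst hik
      refine ⟨cs[cs.length - k], ?_, ?_⟩
      · rw [PySem.List.pyGet?_neg_natCast cs k hk1 hk2]
        exact List.getElem?_eq_getElem (by omega)
      · apply hnosp
        have hd : ((cs.length : Int) + pos).toNat ≤ cs.length - k := by omega
        have : cs[cs.length - k] = (cs.drop (((cs.length : Int) + pos).toNat))[cs.length - k - ((cs.length : Int) + pos).toNat]'(by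
            rw [List.length_drop]; omega) := by
          rw [List.getElem_drop]
          congr 1
          omega
        rw [this]
        exact List.getElem_mem _
    have h0 := pvGoA_zero cs cs.length 0 (by omega)
    rw [Nat.cast_zero] at h0
    rw [hmax, hskip, h0]
    rw [PySem.List.slice_natCast]

theorem getSpecialChar_changed : Claim_changed_getSpecialChar := by
  unfold Claim_changed_getSpecialChar; decide

theorem getSpecialChar_tight : Claim_exact_getSpecialChar := by
  intro data pos _ hpre hD
  unfold Pre_getSpecialChar at hpre
  obtain ⟨hneg, hany⟩ := hD
  simp only [getSpecialChar, getSpecialChar_alt]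
  set cs := data.toList with hcs
  -- the wrapped start position as a natural number j (pos = j - len)
  obtain ⟨j, hj⟩ : ∃ j : Nat, (j : Int) = (cs.length : Int) + pos :=
    ⟨((cs.length : Int) + pos).toNat, by omega⟩
  have hjlen : j < cs.length := by omega
  -- the special character inside the wrapped suffix, as an absolute index m
  rw [PySem.List.slice_from cs (by omega)] at hany
  have htn : ((cs.length : Int) + pos).toNat = j := by omega
  rw [htn] at hany
  obtain ⟨c, hcmem, hcsp⟩ := List.any_eq_true.mp hany
  obtain ⟨t, ht, hct⟩ := List.mem_iff_getElem.mp hcmem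
  have htlen : j + t < cs.length := by
    have := ht; rw [List.length_drop] at this; omega
  have hm : cs[j + t] ∈ pvSpecial := by
    have hgd := List.getElem_drop (xs := cs) (i := j) (j := t) (h := ht)
    rw [hct] at hgd
    rw [hgd] at hcsp
    exact of_decide_eq_true hcsp
  -- A's first loop finds the run start s* inside the wrapped part
  have hs : pvScan cs (fun c => !decide (c ∈ pvSpecial)) j ≤ j + t :=
    pvScan_le_of_not cs _ (j + t) j (j + t) (by omega) (by omega) htlen (by simp [hm])
  have hslen : pvScan cs (fun c => !decide (c ∈ pvSpecial)) j < cs.length := by omega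
  have hssp : cs[pvScan cs (fun c => !decide (c ∈ pvSpecial)) j]'(hslen) ∈ pvSpecial := by
    have := pvScan_stop cs (fun c => !decide (c ∈ pvSpecial)) cs.length j
      (pvScan cs (fun c => !decide (c ∈ pvSpecial)) j) (by omega) rfl hslen
    simpa using this
  -- rewrite A through the wrapped-loop characterisation
  have hposeq : pos = (j : Int) - (cs.length : Int) := by omega
  have hsplit : PySem.List.pyRange pos (cs.length : Int) 1
      = PySem.List.pyRange pos 0 1 ++ PySem.List.pyRange 0 (cs.length : Int) 1 :=
    PySem.List.pyRange_one_append pos 0 (cs.length : Int) (by omega) (by omega)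
  -- B starts at max(pos, 0) = 0
  have hmax : (max pos 0).toNat = 0 := by omega
  rw [hmax, PySem.List.slice_natCast]
  rw [hsplit, hposeq, pvGoA_zero_neg cs cs.length j (by omega), if_pos hslen]
  have h0len : 0 < cs.length := by omega
  by_cases he : pvScan cs (fun c => decide (c ∈ pvSpecial))
      (pvScan cs (fun c => !decide (c ∈ pvSpecial)) j) < cs.length
  · -- A breaks at a wrapped (negative) index; B's index is none or non-negative
    rw [if_pos he]
    intro hcontra
    have h2 := congrArg Prod.snd hcontra
    simp only at h2
    by_cases hb : ((pvScan cs (fun c => decide (c ∈ pvSpecial))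
        (pvScan cs (fun c => !decide (c ∈ pvSpecial)) 0)) : Int) < (cs.length : Int)
    · rw [if_pos hb] at h2
      have := Option.some.inj h2
      omega
    · rw [if_neg hb] at h2
      simp at h2
  · -- A's run reaches the wrap: its word carries the wrapped suffix in front
    rw [if_neg he]
    have h0 := pvGoA_one cs cs.length 0 (cs.drop (pvScan cs (fun c => !decide (c ∈ pvSpecial)) j))
      (by omega)
    rw [Nat.cast_zero] at h0
    rw [h0]
    by_cases h0sp : cs[0] ∈ pvSpecial
    · -- B finds the same break index; the words differ in length
      have hb0 : pvScan cs (fun c => !decide (c ∈ pvSpecial)) 0 = 0 := by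
        rw [pvScan_eq]
        simp [h0len, h0sp]
      rw [hb0]
      intro hcontra
      have h1 := congrArg Prod.fst hcontra
      simp only at h1
      have h1' := congrArg String.toList h1
      rw [String.toList_ofList, String.toList_ofList] at h1'
      have h1l := congrArg List.length h1'
      simp only [List.length_append, List.length_take, List.length_drop, Nat.sub_zero,
        List.drop_zero] at h1l
      omega
    · -- B's run starts at a positive index; A breaks at index 0
      have he0 : pvScan cs (fun c => decide (c ∈ pvSpecial)) 0 = 0 := by
        rw [pvScan_eq]
        simp [h0len, h0sp]
      rw [he0]
      intro hcontra
      have h2 := congrArg Prod.snd hcontra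
      simp only at h2
      rw [if_pos (show ((0:Nat):Int) < (cs.length : Int) by exact_mod_cast h0len)] at h2
      have hb1 : 1 ≤ pvScan cs (fun c => !decide (c ∈ pvSpecial)) 0 := by
        rw [pvScan_eq]
        simp only [h0len, dif_pos]
        rw [if_pos (by simp [h0sp])]
        exact pvScan_ge _ _ _
      have hb2 : 1 ≤ pvScan cs (fun c => decide (c ∈ pvSpecial))
          (pvScan cs (fun c => !decide (c ∈ pvSpecial)) 0) :=
        le_trans hb1 (pvScan_ge _ _ _)
      by_cases hb : ((pvScan cs (fun c => decide (c ∈ pvSpecial))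
          (pvScan cs (fun c => !decide (c ∈ pvSpecial)) 0)) : Int) < (cs.length : Int)
      · rw [if_pos hb] at h2
        have := Option.some.inj h2
        omega
      · rw [if_neg hb] at h2
        simp at h2
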